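-- pv_equiv track=rewrite | github.com/zachwlewis/adventofcode | 2024/d9.py | compact_data
-- ===== SOURCE A (Python) =====
-- def compact_data(data: list[int]) -> list[int]:
--     start, end = 0, len(data) - 1
--     while start < end:
--         if data[start] >= 0:
--             start += 1
--         elif data[end] < 0:
--             end -= 1
--         else:
--             data[start], data[end] = data[end], data[start]
--             start += 1
--             end -= 1
--     return data
-- ===== SOURCE B (Python) =====
-- def compact_data(data: list[int]) -> list[int]:
--     free = [i for i in range(len(data)) if data[i] < 0]
--     filled = [j for j in range(len(data) - 1, -1, -1) if data[j] >= 0]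
--     for f, g in zip(free, filled):
--         if f >= g:
--             break
--         data[f], data[g] = data[g], data[f]
--     return data
-- ===== Notes on version B (the rewrite author's own statement) =====
-- stated objective: alternative
-- what changed: Replaces the converging two-pointer scan (one loop with three interleaved cases) by two index-collecting passes (free slots left-to-right, filled slots right-to-left) followed by a pairing pass that swaps free[k] with filled[k] until the indices cross.
import Mathlib
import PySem

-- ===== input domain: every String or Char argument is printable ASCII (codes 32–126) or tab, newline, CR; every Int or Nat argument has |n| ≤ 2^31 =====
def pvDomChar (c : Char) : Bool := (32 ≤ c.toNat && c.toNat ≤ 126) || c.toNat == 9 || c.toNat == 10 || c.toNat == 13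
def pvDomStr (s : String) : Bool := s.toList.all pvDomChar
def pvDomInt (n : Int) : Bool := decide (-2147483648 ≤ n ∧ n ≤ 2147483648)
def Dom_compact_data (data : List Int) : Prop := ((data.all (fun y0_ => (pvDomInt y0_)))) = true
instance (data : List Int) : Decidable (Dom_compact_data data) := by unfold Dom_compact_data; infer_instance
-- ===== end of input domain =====

-- B replaces A's converging two-pointer scan by two index-collecting passes plus a pairing
-- swap pass (same O(n) cost, different decomposition). Both Pythons mutate `data` in place
-- identically (the same swaps are performed); the theorems are about the returned value.

-- ===== PORT A =====
-- the while-loop of A; indices stay in range (0 ≤ s, e ≤ len-1 whenever read), so pyGetD/pySetD are exact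
def pvLoopA (d : List Int) (s e : Int) : List Int :=
  if _h : s < e then
    if 0 ≤ PySem.List.pyGetD d s 0 then pvLoopA d (s + 1) e
    else if PySem.List.pyGetD d e 0 < 0 then pvLoopA d s (e - 1)
    else pvLoopA (PySem.List.pySetD (PySem.List.pySetD d s (PySem.List.pyGetD d e 0)) e
                    (PySem.List.pyGetD d s 0)) (s + 1) (e - 1)
  else d
termination_by (e - s).toNat
decreasing_by all_goals omega

def compact_data (data : List Int) : List Int :=
  pvLoopA data 0 ((data.length : Int) - 1)

-- ===== PORT B =====
-- the for-loop over zip(free, filled) with its break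
def pvSwapLoop (d : List Int) : List (Int × Int) → List Int
  | [] => d
  | (f, g) :: rest =>
      if f ≥ g then d
      else pvSwapLoop (PySem.List.pySetD (PySem.List.pySetD d f (PySem.List.pyGetD d g 0)) g
                         (PySem.List.pyGetD d f 0)) rest

def compact_data_alt (data : List Int) : List Int :=
  let free := (PySem.List.pyRange 0 (data.length : Int) 1).filter
      (fun i => PySem.List.pyGetD data i 0 < 0)
  let filled := (PySem.List.pyRange ((data.length : Int) - 1) (-1) (-1)).filter
      (fun j => 0 ≤ PySem.List.pyGetD data j 0)
  pvSwapLoop data (free.zip filled)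

-- ===== PRECONDITION & SPEC =====
def Spec_compact_data (data : List Int) (out : List Int) : Prop := out = compact_data_alt data
instance (data : List Int) (out : List Int) : Decidable (Spec_compact_data data out) := by unfold Spec_compact_data; infer_instance

-- ===== CLAIM (what is proved, stated in full; the proofs are below) =====
def Claim_equal_compact_data : Prop := ∀ (data : List Int), Dom_compact_data data → Spec_compact_data data (compact_data data)

-- ===== LEMMAS AND PROOFS =====

-- the free / filled index tables of the subarray d[s..e]
def pvFree (d : List Int) (s e : Int) : List Int :=
  (PySem.List.pyRange s (e + 1) 1).filter (fun i => PySem.List.pyGetD d i 0 < 0)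

def pvFilled (d : List Int) (s e : Int) : List Int :=
  ((PySem.List.pyRange s (e + 1) 1).filter (fun j => 0 ≤ PySem.List.pyGetD d j 0)).reverse

lemma pvSwapLoop_zip_append_right (l1 l2 : List Int) (x : Int) (hx : ∀ f ∈ l1, x ≤ f) :
    ∀ d, pvSwapLoop d (l1.zip (l2 ++ [x])) = pvSwapLoop d (l1.zip l2) := by
  induction l1 generalizing l2 with
  | nil => intro d; simp
  | cons f l1' ih =>
      intro d
      cases l2 with
      | nil =>
          simp only [List.nil_append, List.zip_cons_cons, List.zip_nil_right, pvSwapLoop]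
          have : f ≥ x := hx f (by simp)
          simp [this]
      | cons g l2' =>
          simp only [List.cons_append, List.zip_cons_cons, pvSwapLoop]
          split
          · rfl
          · exact ih l2' (fun a ha => hx a (by simp [ha])) _

lemma pvSwapLoop_zip_append_left (l1 l2 : List Int) (x : Int) (hx : ∀ g ∈ l2, g ≤ x) :
    ∀ d, pvSwapLoop d ((l1 ++ [x]).zip l2) = pvSwapLoop d (l1.zip l2) := by
  induction l2 generalizing l1 with
  | nil => intro d; simp
  | cons g l2' ih =>
      intro d
      cases l1 with
      | nil =>
          simp only [List.nil_append, List.zip_cons_cons, List.zip_nil_left, pvSwapLoop]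
          have : x ≥ g := hx g (by simp)
          simp [this]
      | cons f l1' =>
          simp only [List.cons_append, List.zip_cons_cons, pvSwapLoop]
          split
          · rfl
          · exact ih l1' (fun a ha => hx a (by simp [ha])) _

-- pyGetD on [0, len) is stable under a pySetD at a different in-range index
lemma pvGet_set_ne (d : List Int) (k i v : Int) (h0k : 0 ≤ k) (_hk : k < (d.length : Int))
    (h0i : 0 ≤ i) (hi : i < (d.length : Int)) (hne : i ≠ k) :
    PySem.List.pyGetD (PySem.List.pySetD d k v) i 0 = PySem.List.pyGetD d i 0 := by
  rw [PySem.List.pySetD_of_nonneg d v h0k]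
  rw [PySem.List.pyGetD_eq_getElem _ 0 h0i (by simpa using hi),
      PySem.List.pyGetD_eq_getElem _ 0 h0i (by simpa using hi)]
  exact List.getElem_set_ne (show k.toNat ≠ i.toNat by omega) _

lemma pvFree_congr (d d' : List Int) (s e : Int)
    (h : ∀ i, s ≤ i → i < e + 1 → PySem.List.pyGetD d' i 0 = PySem.List.pyGetD d i 0) :
    pvFree d' s e = pvFree d s e := by
  unfold pvFree
  refine List.filter_congr ?_
  intro i hi
  rcases (PySem.List.mem_pyRange_one).1 hi with ⟨h1, h2⟩
  simp [h i h1 h2]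

lemma pvFilled_congr (d d' : List Int) (s e : Int)
    (h : ∀ i, s ≤ i → i < e + 1 → PySem.List.pyGetD d' i 0 = PySem.List.pyGetD d i 0) :
    pvFilled d' s e = pvFilled d s e := by
  unfold pvFilled
  congr 1
  refine List.filter_congr ?_
  intro i hi
  rcases (PySem.List.mem_pyRange_one).1 hi with ⟨h1, h2⟩
  simp [h i h1 h2]

lemma pvLoopA_eq (n : Nat) : ∀ (d : List Int) (s e : Int), (e - s).toNat = n → 0 ≤ s →
    e < (d.length : Int) →
    pvLoopA d s e = pvSwapLoop d ((pvFree d s e).zip (pvFilled d s e)) := by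
  induction n using Nat.strong_induction_on with
  | _ n ih =>
    intro d s e hn h0 he
    by_cases hse : s < e
    · rw [pvLoopA]; simp only [hse, dite_true]
      by_cases hs : 0 ≤ PySem.List.pyGetD d s 0
      · -- skip left: s is a filled slot
        simp only [hs, if_true]
        have hfree : pvFree d s e = pvFree d (s + 1) e := by
          unfold pvFree
          rw [PySem.List.pyRange_one_cons (by omega)]
          simp [not_lt.2 hs]
        have hfil : pvFilled d s e = pvFilled d (s + 1) e ++ [s] := by
          unfold pvFilled
          rw [PySem.List.pyRange_one_cons (by omega)]
          simp [hs]
        rw [hfree, hfil, pvSwapLoop_zip_append_right _ _ _ ?_ d]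
        · exact ih ((e - (s + 1)).toNat) (by omega) d (s + 1) e rfl (by omega) he
        · intro f hf
          have := (PySem.List.mem_pyRange_one).1 (List.mem_of_mem_filter hf)
          omega
      · by_cases hee : PySem.List.pyGetD d e 0 < 0
        · -- skip right: e is a free slot
          simp only [hs, hee, if_false, if_true]
          have hfree : pvFree d s e = pvFree d s (e - 1) ++ [e] := by
            unfold pvFree
            rw [show e + 1 = e + 1 by rfl, PySem.List.pyRange_one_succ_right (by omega)]
            rw [List.filter_append]
            simp [hee]
          have hfil : pvFilled d s e = pvFilled d s (e - 1) := by
            unfold pvFilled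
            rw [PySem.List.pyRange_one_succ_right (by omega)]
            rw [List.filter_append]
            simp [not_le.2 hee]
          rw [hfree, hfil, pvSwapLoop_zip_append_left _ _ _ ?_ d]
          · exact ih ((e - 1 - s).toNat) (by omega) d s (e - 1) rfl h0 (by omega)
          · intro g hg
            have := (PySem.List.mem_pyRange_one).1 (List.mem_of_mem_filter (List.mem_reverse.1 hg))
            omega
        · -- swap case
          simp only [hs, hee, if_false]
          set d' := PySem.List.pySetD (PySem.List.pySetD d s (PySem.List.pyGetD d e 0)) e
              (PySem.List.pyGetD d s 0) with hd'
          have hlen : (d'.length : Int) = (d.length : Int) := by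
            simp [hd', PySem.List.length_pySetD]
          have hagree : ∀ i, s + 1 ≤ i → i < (e - 1) + 1 →
              PySem.List.pyGetD d' i 0 = PySem.List.pyGetD d i 0 := by
            intro i hi1 hi2
            rw [hd']
            rw [pvGet_set_ne _ e i _ (by omega) (by simp [PySem.List.length_pySetD]; omega)
                  (by omega) (by simp [PySem.List.length_pySetD]; omega) (by omega)]
            exact pvGet_set_ne d s i _ (by omega) (by omega) (by omega) (by omega) (by omega)
          have hfree : pvFree d s e = s :: pvFree d (s + 1) (e - 1) := by
            unfold pvFree
            rw [PySem.List.pyRange_one_cons (by omega)]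
            rw [show s + 1 = s + 1 by rfl]
            have : PySem.List.pyRange (s + 1) (e + 1) 1
                = PySem.List.pyRange (s + 1) e 1 ++ [e] := by
              have := PySem.List.pyRange_one_succ_right (a := s + 1) (b := e) (by omega)
              simpa using this
            rw [this]
            simp [not_le.1 hs, List.filter_append, not_lt.1 hee]
          have hfil : pvFilled d s e = e :: pvFilled d (s + 1) (e - 1) := by
            unfold pvFilled
            rw [PySem.List.pyRange_one_cons (by omega)]
            have : PySem.List.pyRange (s + 1) (e + 1) 1
                = PySem.List.pyRange (s + 1) e 1 ++ [e] := by
              have := PySem.List.pyRange_one_succ_right (a := s + 1) (b := e) (by omega)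
              simpa using this
            rw [this]
            simp [hs, List.filter_append, not_lt.1 hee]
          rw [hfree, hfil]
          simp only [List.zip_cons_cons, pvSwapLoop]
          rw [if_neg (by omega)]
          rw [← hd']
          rw [ih ((e - 1 - (s + 1)).toNat) (by omega) d' (s + 1) (e - 1) rfl (by omega)
                (by omega)]
          rw [pvFree_congr d d' (s + 1) (e - 1) hagree,
              pvFilled_congr d d' (s + 1) (e - 1) hagree]
    · -- loop does not run: the zipped pair list is empty
      rw [pvLoopA]; simp only [hse, dite_false]
      by_cases hlt : e < s
      · have h1 : pvFree d s e = [] := by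
          unfold pvFree
          rw [PySem.List.pyRange_one_eq_nil (by omega)]; rfl
        rw [h1]; simp [pvSwapLoop]
      · have hes : s = e := by omega
        subst hes
        by_cases hv : PySem.List.pyGetD d s 0 < 0
        · have h2 : pvFilled d s s = [] := by
            unfold pvFilled
            rw [PySem.List.pyRange_one_cons (by omega), PySem.List.pyRange_one_eq_nil (by omega)]
            simp [not_le.2 hv]
          rw [h2]; simp [pvSwapLoop]
        · have h1 : pvFree d s s = [] := by
            unfold pvFree
            rw [PySem.List.pyRange_one_cons (by omega), PySem.List.pyRange_one_eq_nil (by omega)]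
            simp [not_lt.1 hv]
          rw [h1]; simp [pvSwapLoop]

-- ===== VERDICT (by name: the statement is the Claim_ definition above) =====
theorem compact_data_spec : Claim_equal_compact_data := by
  intro data _hdom
  unfold Spec_compact_data compact_data compact_data_alt
  have hmain := pvLoopA_eq ((((data.length : Int) - 1) - 0).toNat) data 0
      ((data.length : Int) - 1) rfl (by omega) (by omega)
  rw [hmain]
  have hfree : pvFree data 0 ((data.length : Int) - 1)
      = (PySem.List.pyRange 0 (data.length : Int) 1).filter
          (fun i => PySem.List.pyGetD data i 0 < 0) := by
    unfold pvFree; rw [show (data.length : Int) - 1 + 1 = (data.length : Int) by omega]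
  have hfil : pvFilled data 0 ((data.length : Int) - 1)
      = (PySem.List.pyRange ((data.length : Int) - 1) (-1) (-1)).filter
          (fun j => 0 ≤ PySem.List.pyGetD data j 0) := by
    unfold pvFilled
    rw [show (data.length : Int) - 1 + 1 = (data.length : Int) by omega]
    rw [PySem.List.pyRange_neg_one_eq_reverse]
    rw [show (-1 : Int) + 1 = 0 by rfl, show (data.length : Int) - 1 + 1 = (data.length : Int) by omega]
    rw [List.filter_reverse]
  rw [hfree, hfil]
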